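-- pv_equiv track=rewrite | github.com/Nahaeran/swea-algorithm | 1248_공통조상.py | sizeOfSubTree
-- ===== SOURCE A (Python) =====
-- def sizeOfSubTree(resultDict, root):
--     nextRoot = []
--     total = 0
--     for k, v in resultDict.items():
--         if v == root:
--             total += 1
--             nextRoot.append(k)
--     for tempRoot in nextRoot:
--         total += sizeOfSubTree(resultDict, tempRoot)
--     return total
-- ===== SOURCE B (Python) =====
-- def sizeOfSubTree(resultDict, root):
--     children = {}
--     for k, v in resultDict.items():
--         children.setdefault(v, []).append(k)
--     total = 0
--     stack = [root]
--     while stack: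
--         node = stack.pop()
--         for c in children.get(node, []):
--             total += 1
--             stack.append(c)
--     return total
-- ===== Notes on version B (the rewrite author's own statement) =====
-- stated objective: alternative
-- what changed: A rescans the whole dict in every recursive call; B builds a parent-to-children adjacency dict in one pass and counts nodes with a single iterative stack traversal, no recursion and no rescanning (not measurably faster on the generated input family).
import Mathlib
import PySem

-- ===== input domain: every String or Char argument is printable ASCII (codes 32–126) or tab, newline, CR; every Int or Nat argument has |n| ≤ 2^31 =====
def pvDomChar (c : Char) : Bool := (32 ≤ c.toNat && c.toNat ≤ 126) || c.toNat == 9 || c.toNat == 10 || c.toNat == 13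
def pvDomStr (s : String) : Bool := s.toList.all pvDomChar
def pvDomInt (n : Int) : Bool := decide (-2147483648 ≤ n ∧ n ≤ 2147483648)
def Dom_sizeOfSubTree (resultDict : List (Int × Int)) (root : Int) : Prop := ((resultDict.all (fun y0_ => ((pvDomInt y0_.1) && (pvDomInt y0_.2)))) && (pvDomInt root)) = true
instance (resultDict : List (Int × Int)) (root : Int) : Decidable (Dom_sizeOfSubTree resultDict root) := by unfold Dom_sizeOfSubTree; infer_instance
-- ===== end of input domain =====

-- B replaces A's recursive full-dict rescans with a children-adjacency dict built once plus an
-- iterative stack traversal (objective: alternative; not measurably faster on the timed inputs).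


-- ===== PORT A =====
-- A's unbounded recursion is made total with a fuel counter; under Pre_ (unique keys, no
-- parent-pointer cycle through root — exactly where the Python returns instead of hitting
-- RecursionError) the recursion depth is at most length+1, so the fuel is never exhausted
-- on admitted inputs.
def goA : Nat → List (Int × Int) → Int → Int
  | 0, _, _ => 0
  | f+1, d, root =>
    -- total = 0; for k, v in resultDict.items(): if v == root: total += 1; nextRoot.append(k)
    let p := d.foldl (fun (acc : Int × List Int) kv =>
        if kv.2 == root then (acc.1 + 1, acc.2 ++ [kv.1]) else acc) (0, [])
    -- for tempRoot in nextRoot: total += sizeOfSubTree(resultDict, tempRoot)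
    p.2.foldl (fun t c => t + goA f d c) p.1

def sizeOfSubTree (resultDict : List (Int × Int)) (root : Int) : Int :=
  goA (resultDict.length + 1) resultDict root

-- ===== PORT B =====
-- children = {}; for k, v in resultDict.items(): children.setdefault(v, []).append(k)
def buildChildren (d : List (Int × Int)) : PySem.Dict Int (List Int) :=
  d.foldl (fun cd kv => cd.modify kv.2 [] (fun l => l ++ [kv.1])) PySem.Dict.empty

-- while stack: node = stack.pop(); for c in children.get(node, []): total += 1; stack.append(c)
-- (the while loop is made total with a fuel counter; under Pre_ the number of pops is bounded
-- by the fuel chosen in sizeOfSubTree_alt, so the fuel is never exhausted on admitted inputs)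
def loopB (cd : PySem.Dict Int (List Int)) : Nat → List Int → Int → Int
  | 0, _, total => total
  | f+1, stack, total =>
    match stack.getLast? with
    | none => total
    | some node =>
      let cs := cd.getD node []
      loopB cd f (stack.dropLast ++ cs) (total + (cs.length : Int))

def sizeOfSubTree_alt (resultDict : List (Int × Int)) (root : Int) : Int :=
  loopB (buildChildren resultDict)
    ((resultDict.length + 1) ^ (resultDict.length + 1)) [root] 0

-- ===== PRECONDITION & SPEC =====
-- one step along the parent pointer (identity outside the key set)
def parentStep (d : List (Int × Int)) (x : Int) : Int :=
  match List.lookup x d with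
  | some p => p
  | none => x

-- Pre_ excludes association lists with duplicate keys (no Python dict corresponds to such a
-- list) and the inputs whose parent map has a cycle through root, on which the Python A never
-- returns (it recurses forever, RecursionError) and the Python B's while loop never ends either.
def Pre_sizeOfSubTree (resultDict : List (Int × Int)) (root : Int) : Prop :=
  (resultDict.map Prod.fst).Nodup ∧
  (root ∈ resultDict.map Prod.fst →
    ∀ k ∈ List.range resultDict.length, (parentStep resultDict)^[k+1] root ≠ root)

instance (resultDict : List (Int × Int)) (root : Int) : Decidable (Pre_sizeOfSubTree resultDict root) := by unfold Pre_sizeOfSubTree; infer_instance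

def pvWitness_sizeOfSubTree : (List (Int × Int)) × Int := ([(2, 1), (3, 1), (4, 2)], 1)

def Spec_sizeOfSubTree (resultDict : List (Int × Int)) (root : Int) (out : Int) : Prop := out = sizeOfSubTree_alt resultDict root
instance (resultDict : List (Int × Int)) (root : Int) (out : Int) : Decidable (Spec_sizeOfSubTree resultDict root out) := by unfold Spec_sizeOfSubTree; infer_instance

-- ===== CLAIM (what is proved, stated in full; the proofs are below) =====
def Claim_equal_sizeOfSubTree : Prop := ∀ (resultDict : List (Int × Int)) (root : Int), Dom_sizeOfSubTree resultDict root → Pre_sizeOfSubTree resultDict root → Spec_sizeOfSubTree resultDict root (sizeOfSubTree resultDict root)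

-- ===== LEMMAS AND PROOFS =====

-- distance (number of parent-pointer steps) from x up to root, searched up to length steps;
-- none when root is not reached within length steps
def distTo (d : List (Int × Int)) (root x : Int) : Option Nat :=
  (List.range (d.length + 1)).find? (fun k => (parentStep d)^[k] x == root)

-- children of node r in resultDict, in dict-iteration order
def chl (d : List (Int × Int)) (r : Int) : List Int :=
  (d.filter (fun kv => kv.2 == r)).map Prod.fst

theorem find?_range_eq_some {p : Nat → Bool} {N m : Nat}
    (hm : m < N) (hp : p m = true) (hmin : ∀ j < m, p j = false) :
    (List.range N).find? p = some m := by
  induction m generalizing N p with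
  | zero =>
    cases N with
    | zero => omega
    | succ N => rw [List.range_succ_eq_map, List.find?_cons_of_pos hp]
  | succ m ih =>
    cases N with
    | zero => omega
    | succ N =>
      rw [List.range_succ_eq_map, List.find?_cons_of_neg (by simp [hmin 0 (by omega)]),
        List.find?_map]
      rw [ih (p := p ∘ Nat.succ) (by omega) hp (fun j hj => hmin (j+1) (by omega))]
      rfl

theorem find?_range_min {p : Nat → Bool} {N m : Nat}
    (h : (List.range N).find? p = some m) : ∀ j < m, p j = false := by
  induction N generalizing p m with
  | zero => simp at h
  | succ N ih =>
    rw [List.range_succ_eq_map] at h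
    by_cases h0 : p 0 = true
    · rw [List.find?_cons_of_pos h0] at h
      have hm0 : m = 0 := by simpa using h.symm
      subst hm0
      intro j hj
      omega
    · rw [List.find?_cons_of_neg h0, List.find?_map] at h
      cases hm : (List.range N).find? (p ∘ Nat.succ) with
      | none => rw [hm] at h; simp at h
      | some m' =>
        rw [hm] at h
        simp only [Option.map_some] at h
        have hm'' : m = m' + 1 := by simpa using h.symm
        subst hm''
        intro j hj
        cases j with
        | zero => simpa using h0
        | succ j => exact ih hm j (by omega)

theorem dist_iter {d : List (Int × Int)} {root x : Int} {k : Nat}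
    (h : distTo d root x = some k) : (parentStep d)^[k] x = root := by
  have := List.find?_some h
  simpa using this

theorem dist_min {d : List (Int × Int)} {root x : Int} {k : Nat}
    (h : distTo d root x = some k) : ∀ j < k, (parentStep d)^[j] x ≠ root := by
  intro j hj
  have := find?_range_min h j hj
  simpa using this

theorem dist_le {d : List (Int × Int)} {root x : Int} {k : Nat}
    (h : distTo d root x = some k) : k ≤ d.length := by
  have := List.mem_range.mp (List.mem_of_find?_eq_some h)
  omega

theorem dist_root (d : List (Int × Int)) (root : Int) : distTo d root root = some 0 :=
  find?_range_eq_some (by omega) (by simp) (by omega)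

theorem lookup_of_mem_nodup {d : List (Int × Int)} {r p : Int}
    (hn : (d.map Prod.fst).Nodup) (h : (r, p) ∈ d) : List.lookup r d = some p := by
  induction d with
  | nil => simp at h
  | cons kv t ih =>
    obtain ⟨k, v⟩ := kv
    simp only [List.map_cons, List.nodup_cons] at hn
    rcases List.mem_cons.mp h with h1 | h2
    · obtain ⟨rfl, rfl⟩ := Prod.mk.inj h1
      rw [List.lookup_cons]; simp
    · have hrk : r ≠ k := by
        rintro rfl
        exact hn.1 (List.mem_map.mpr ⟨(r, p), h2, rfl⟩)
      have hb : (r == k) = false := by simp [hrk]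
      rw [List.lookup_cons, hb]
      exact ih hn.2 h2

theorem lookup_none_iff {d : List (Int × Int)} {r : Int} :
    List.lookup r d = none ↔ r ∉ d.map Prod.fst := by
  induction d with
  | nil => simp [List.lookup]
  | cons kv t ih =>
    obtain ⟨k, v⟩ := kv
    by_cases hk : r = k
    · subst hk
      rw [List.lookup_cons]
      simp
    · have hb : (r == k) = false := by simp [hk]
      rw [List.lookup_cons, hb]
      simp [hk, ih]

theorem parentStep_frozen {d : List (Int × Int)} {x : Int}
    (h : x ∉ d.map Prod.fst) : ∀ m, (parentStep d)^[m] x = x := by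
  have hstep : parentStep d x = x := by simp [parentStep, lookup_none_iff.mpr h]
  intro m
  induction m with
  | zero => rfl
  | succ m ih => rw [Function.iterate_succ_apply, hstep, ih]

-- every iterate strictly before the minimal distance is a key
theorem iter_mem_keys {d : List (Int × Int)} {root x : Int} {k : Nat}
    (h : distTo d root x = some k) : ∀ t < k, (parentStep d)^[t] x ∈ d.map Prod.fst := by
  intro t ht
  by_contra hmem
  have hfix := parentStep_frozen hmem (k - t)
  rw [← Function.iterate_add_apply, show k - t + t = k from by omega] at hfix
  exact dist_min h t ht (hfix.symm.trans (dist_iter h))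

-- the child of a node at distance k from root sits at distance k+1
theorem dist_child {d : List (Int × Int)} {root x c : Int} {k : Nat}
    (hpre : Pre_sizeOfSubTree d root) (hx : distTo d root x = some k)
    (hc : (c, x) ∈ d) : distTo d root c = some (k + 1) := by
  have hstep : parentStep d c = x := by simp [parentStep, lookup_of_mem_nodup hpre.1 hc]
  have hiterc : ∀ t, (parentStep d)^[t + 1] c = (parentStep d)^[t] x := by
    intro t; rw [Function.iterate_succ_apply, hstep]
  have hreach : (parentStep d)^[k + 1] c = root := by rw [hiterc, dist_iter hx]
  -- the iterates 0..k of c are pairwise distinct keys, so k+1 ≤ length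
  have hinj : ∀ i j, i < j → j ≤ k → (parentStep d)^[i] c ≠ (parentStep d)^[j] c := by
    intro i j hij hjk heq
    have hsh : (parentStep d)^[i + (k + 1 - j)] c = (parentStep d)^[j + (k + 1 - j)] c := by
      rw [Nat.add_comm i _, Nat.add_comm j _, Function.iterate_add_apply,
        Function.iterate_add_apply, heq]
    rw [show j + (k + 1 - j) = k + 1 from by omega] at hsh
    rw [hreach] at hsh
    have he1 : 1 ≤ i + (k + 1 - j) := by omega
    have := hiterc (i + (k + 1 - j) - 1)
    rw [show i + (k + 1 - j) - 1 + 1 = i + (k + 1 - j) from by omega] at this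
    rw [this] at hsh
    exact dist_min hx _ (by omega) hsh
  have hmemk : ∀ j ≤ k, (parentStep d)^[j] c ∈ d.map Prod.fst := by
    intro j hj
    cases j with
    | zero => exact List.mem_map.mpr ⟨(c, x), hc, rfl⟩
    | succ t =>
      rw [hiterc]
      exact iter_mem_keys hx t (by omega)
  have hlen : k + 1 ≤ d.length := by
    have hnd : ((List.range (k + 1)).map (fun j => (parentStep d)^[j] c)).Nodup := by
      refine List.Nodup.map_on ?_ (List.nodup_range)
      intro i hi j hj hij
      rcases Nat.lt_trichotomy i j with h | h | h
      · exact absurd hij (hinj i j h (by simpa using Nat.lt_succ_iff.mp (List.mem_range.mp hj)))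
      · exact h
      · exact absurd hij.symm (hinj j i h (by simpa using Nat.lt_succ_iff.mp (List.mem_range.mp hi)))
    have hsub : ((List.range (k + 1)).map (fun j => (parentStep d)^[j] c)).toFinset ⊆
        (d.map Prod.fst).toFinset := by
      intro y hy
      rw [List.mem_toFinset] at hy ⊢
      obtain ⟨j, hj, rfl⟩ := List.mem_map.mp hy
      exact hmemk j (Nat.lt_succ_iff.mp (List.mem_range.mp hj))
    have h1 := Finset.card_le_card hsub
    rw [List.toFinset_card_of_nodup hnd] at h1
    have h2 := (d.map Prod.fst).toFinset_card_le
    simp only [List.length_map, List.length_range] at h1 h2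
    omega
  -- c ≠ root (else the parent chain from root would cycle back to root)
  have hcroot : c ≠ root := by
    intro hce
    have hrk : root ∈ d.map Prod.fst := List.mem_map.mpr ⟨(c, x), hc, hce⟩
    rw [hce] at hreach
    exact hpre.2 hrk k (List.mem_range.mpr (by omega)) hreach
  refine find?_range_eq_some (by omega) (by simpa using hreach) ?_
  intro j hj
  cases j with
  | zero => simpa using hcroot
  | succ t =>
    have := dist_min hx t (by omega)
    rw [← hiterc] at this
    simpa using this

theorem chl_length_le (d : List (Int × Int)) (r : Int) : (chl d r).length ≤ d.length := by
  unfold chl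
  rw [List.length_map]
  exact List.length_filter_le _ _

theorem mem_chl {d : List (Int × Int)} {r c : Int} (h : c ∈ chl d r) : (c, r) ∈ d := by
  obtain ⟨kv, hkv, rfl⟩ := List.mem_map.mp h
  have := List.mem_filter.mp hkv
  have h2 : kv.2 = r := by simpa using this.2
  exact h2 ▸ (by exact this.1)

theorem goA_succ (f : Nat) (d : List (Int × Int)) (root : Int) :
    goA (f+1) d root = ((chl d root).length : Int) + ((chl d root).map (goA f d)).sum := by
  show (d.foldl (fun (acc : Int × List Int) kv =>
        if kv.2 == root then (acc.1 + 1, acc.2 ++ [kv.1]) else acc) (0, [])).2.foldl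
        (fun t c => t + goA f d c)
        (d.foldl (fun (acc : Int × List Int) kv =>
        if kv.2 == root then (acc.1 + 1, acc.2 ++ [kv.1]) else acc) (0, [])).1 = _
  rw [PySem.List.foldl_congr_mem d _ (fun (acc : Int × List Int) kv =>
        ((if kv.2 == root then acc.1 + 1 else acc.1),
         (if kv.2 == root then acc.2 ++ [kv.1] else acc.2))) (0, [])
      (by intro acc x _; by_cases h : (x.2 == root) = true <;> simp [h])]
  rw [PySem.List.foldl_prod_mk (fun a (kv : Int × Int) => if (kv.2 == root) = true then a + 1 else a) (fun b (kv : Int × Int) => if (kv.2 == root) = true then b ++ [kv.1] else b) d 0 []]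
  rw [PySem.List.foldl_count_if, PySem.List.foldl_append_if]
  rw [PySem.List.foldl_add]
  simp [chl, List.length_map, List.countP_eq_length_filter]

-- a node at maximal distance length has no children
theorem chl_nil_of_max {d : List (Int × Int)} {root r : Int}
    (hpre : Pre_sizeOfSubTree d root) (hr : distTo d root r = some d.length) :
    chl d r = [] := by
  by_contra hne
  obtain ⟨c, hc⟩ := List.exists_mem_of_ne_nil _ hne
  have := dist_le (dist_child hpre hr (mem_chl hc))
  omega

theorem goA_mono {d : List (Int × Int)} {root : Int} (hpre : Pre_sizeOfSubTree d root) :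
    ∀ (f₁ f₂ : Nat) (r : Int) (k : Nat), distTo d root r = some k →
      d.length ≤ f₁ + k → d.length ≤ f₂ + k → goA f₁ d r = goA f₂ d r := by
  intro f₁
  induction f₁ with
  | zero =>
    intro f₂ r k hk h1 h2
    have hke : k = d.length := by have := dist_le hk; omega
    subst hke
    cases f₂ with
    | zero => rfl
    | succ f₂ => rw [goA_succ, chl_nil_of_max hpre hk]; simp [goA]
  | succ f₁ ih =>
    intro f₂ r k hk h1 h2
    cases f₂ with
    | zero =>
      have hke : k = d.length := by have := dist_le hk; omega
      subst hke
      rw [goA_succ, chl_nil_of_max hpre hk]; simp [goA]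
    | succ f₂ =>
      rw [goA_succ, goA_succ]
      congr 1
      apply congrArg
      apply List.map_congr_left
      intro c hc
      have hkc := dist_child hpre hk (mem_chl hc)
      exact ih f₂ c (k+1) hkc (by omega) (by omega)

theorem getD_buildChildren (d : List (Int × Int)) (r : Int) :
    (buildChildren d).getD r [] = chl d r := by
  unfold buildChildren
  have h := (List.foldl_map (f := fun kv : Int × Int => (kv.2, kv.1))
      (g := fun cd (p : Int × Int) => cd.modify p.1 [] (fun l => l ++ [p.2]))
      (l := d) (init := PySem.Dict.empty)).symm
  simp only at h
  rw [show (List.foldl (fun cd kv => cd.modify kv.2 [] fun l => l ++ [kv.1]) PySem.Dict.empty d) = (List.foldl (fun cd (p : Int × Int) => cd.modify p.1 [] fun l => l ++ [p.2]) PySem.Dict.empty (d.map (fun kv : Int × Int => (kv.2, kv.1)))) from h]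
  rw [PySem.Dict.getD_foldl_modify_append]
  simp [chl, List.filter_map, List.map_map, Function.comp_def]

theorem sz_node_eq {d : List (Int × Int)} {root : Int} (hpre : Pre_sizeOfSubTree d root)
    {node : Int} {k : Nat} (hk : distTo d root node = some k) :
    goA (d.length + 1) d node
      = ((chl d node).length : Int)
        + ((chl d node).map (fun r => goA (d.length + 1) d r)).sum := by
  rw [goA_succ]
  congr 1
  apply congrArg
  apply List.map_congr_left
  intro c hc
  have hkc := dist_child hpre hk (mem_chl hc)
  have := dist_le hkc
  exact goA_mono hpre d.length (d.length + 1) c (k+1) hkc (by omega) (by omega)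

theorem loopB_invariant (d : List (Int × Int)) (root : Int)
    (hpre : Pre_sizeOfSubTree d root) :
    ∀ (f : Nat) (stack : List Int) (total : Int),
      (∀ r ∈ stack, (distTo d root r).isSome) →
      (stack.map (fun r => (d.length + 1) ^ (d.length - (distTo d root r).getD 0))).sum ≤ f →
      loopB (buildChildren d) f stack total
        = total + (stack.map (fun r => goA (d.length + 1) d r)).sum := by
  intro f
  induction f with
  | zero =>
    intro stack total hsome h
    cases stack with
    | nil => simp [loopB]
    | cons x t =>
      exfalso
      have h1 : 1 ≤ (d.length + 1) ^ (d.length - (distTo d root x).getD 0) :=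
        Nat.one_le_pow _ _ (by omega)
      simp only [List.map_cons, List.sum_cons] at h
      omega
  | succ f ih =>
    intro stack total hsome h
    cases hs : stack.getLast? with
    | none =>
      rw [List.getLast?_eq_none_iff.mp hs]
      simp [loopB]
    | some node =>
      have hne : stack ≠ [] := by rintro rfl; simp at hs
      have hst : stack = stack.dropLast ++ [node] := by
        conv_lhs => rw [← List.dropLast_append_getLast hne]
        rw [List.getLast?_eq_some_getLast hne] at hs
        simp [Option.some.injEq] at hs
        rw [hs]
      have hnodemem : node ∈ stack := by rw [hst]; simp
      obtain ⟨k, hk⟩ := Option.isSome_iff_exists.mp (hsome node hnodemem)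
      have hkle : k ≤ d.length := dist_le hk
      show loopB (buildChildren d) (f+1) stack total = _
      rw [loopB]
      simp only [hs]
      rw [getD_buildChildren]
      set n := d.length with hn
      set w := fun r => (n + 1) ^ (n - (distTo d root r).getD 0) with hw
      set sz := fun r => goA (n + 1) d r with hsz
      set cs := chl d node with hcs
      set dl := stack.dropLast with hdl
      have hdlmem : ∀ r ∈ dl, r ∈ stack := fun r hr => List.dropLast_subset _ hr
      have hFc : ∀ c ∈ cs, distTo d root c = some (k + 1) := by
        intro c hc; exact dist_child hpre hk (mem_chl hc)
      have hsome' : ∀ r ∈ dl ++ cs, (distTo d root r).isSome := by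
        intro r hr
        rcases List.mem_append.mp hr with h1 | h2
        · exact hsome r (hdlmem r h1)
        · rw [hFc r h2]; rfl
      have hwnode : w node = (n + 1) ^ (n - k) := by rw [hw]; simp [hk]
      have hwsum : (stack.map w).sum = (dl.map w).sum + w node := by
        conv_lhs => rw [hst]
        simp
      have hfuel : ((dl ++ cs).map w).sum ≤ f := by
        rw [List.map_append, List.sum_append]
        rcases List.eq_nil_or_concat cs with hnil | ⟨_, _, hcons⟩
        · rw [hnil]
          have hone : 1 ≤ w node := by rw [hwnode]; exact Nat.one_le_pow _ _ (by omega)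
          simp; omega
        · have hcsne : cs ≠ [] := by rw [hcons]; simp
          obtain ⟨c0, hc0⟩ := List.exists_mem_of_ne_nil _ hcsne
          have ha1 : k + 1 ≤ n := dist_le (hFc c0 hc0)
          set e := n - k - 1 with he
          have hwn : w node = (n + 1) * (n + 1) ^ e := by
            rw [hwnode, show n - k = e + 1 from by omega, pow_succ]
            ring
          have hmapcs : cs.map w = List.replicate cs.length ((n + 1) ^ e) := by
            rw [List.eq_replicate_iff]
            constructor
            · simp
            · intro b hb
              obtain ⟨c, hc, rfl⟩ := List.mem_map.mp hb
              rw [hw]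
              simp only [hFc c hc]
              rw [show n - (some (k+1)).getD 0 = e from by simp; omega]
          have hcslen : cs.length ≤ n := chl_length_le d node
          have hcssum : (cs.map w).sum ≤ n * (n + 1) ^ e := by
            rw [hmapcs, List.sum_replicate, smul_eq_mul]
            exact Nat.mul_le_mul_right _ hcslen
          have hpow1 : 1 ≤ (n + 1) ^ e := Nat.one_le_pow _ _ (by omega)
          have := hwsum
          rw [hwn] at this
          have hbig : (dl.map w).sum + (n + 1) * (n + 1) ^ e ≤ f + 1 := by omega
          have : (cs.map w).sum + 1 ≤ (n + 1) * (n + 1) ^ e := by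
            have : n * (n + 1) ^ e + (n + 1) ^ e = (n + 1) * (n + 1) ^ e := by ring
            omega
          omega
      rw [ih (dl ++ cs) (total + (cs.length : Int)) hsome' hfuel]
      have hsum : (stack.map sz).sum = (dl.map sz).sum + sz node := by
        conv_lhs => rw [hst]
        simp
      rw [hsum, List.map_append, List.sum_append]
      have hnode : sz node = ((cs.length : Int)) + (cs.map sz).sum :=
        sz_node_eq hpre hk
      rw [hnode]
      ring

-- ===== VERDICT (by name: the statement is the Claim_ definition above) =====
theorem sizeOfSubTree_spec : Claim_equal_sizeOfSubTree := by
  intro d root _hdom hpre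
  unfold Spec_sizeOfSubTree sizeOfSubTree sizeOfSubTree_alt
  rw [loopB_invariant d root hpre _ [root] 0
    (by intro r hr; simp at hr; subst hr; rw [dist_root]; rfl)
    (by
      simp only [List.map_cons, List.map_nil, List.sum_cons, List.sum_nil, Nat.add_zero]
      rw [dist_root]
      exact Nat.pow_le_pow_right (Nat.succ_le_succ (Nat.zero_le _)) (by omega))]
  simp
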